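-- pv_equiv track=rewrite | github.com/vanreece/wordsearch | wordsearch.py | word_in_set
-- ===== SOURCE A (Python) =====
-- def word_in_set(word, charset):
--   remaining_set = charset
--   for letter in word:
--     pos = remaining_set.find(letter)
--     if pos == -1:
--       pos = remaining_set.find(".")
--       if pos == -1:
--         return False
--       else:
--         remaining_set = remaining_set[:pos] + remaining_set[pos+1:]
--     else:
--       remaining_set = remaining_set[:pos] + remaining_set[pos+1:]
--   return True
-- ===== SOURCE B (Python) =====
-- def word_in_set(word, charset):
--     need = {}
--     for ch in word:
--         need[ch] = need.get(ch, 0) + 1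
--     have = {}
--     for ch in charset:
--         have[ch] = have.get(ch, 0) + 1
--     dots = have.get('.', 0) - need.get('.', 0)
--     for ch, n in need.items():
--         if ch != '.':
--             dots -= max(0, n - have.get(ch, 0))
--     return dots >= 0
-- ===== Notes on version B (the rewrite author's own statement) =====
-- stated objective: faster
-- what changed: Replaced the greedy find-and-delete loop over a shrinking copy of charset (rebuilding the string on every letter) by a single counting pass: build letter counters for word and charset, then check that the '.' wildcards cover the per-letter deficits.
import Mathlib
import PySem

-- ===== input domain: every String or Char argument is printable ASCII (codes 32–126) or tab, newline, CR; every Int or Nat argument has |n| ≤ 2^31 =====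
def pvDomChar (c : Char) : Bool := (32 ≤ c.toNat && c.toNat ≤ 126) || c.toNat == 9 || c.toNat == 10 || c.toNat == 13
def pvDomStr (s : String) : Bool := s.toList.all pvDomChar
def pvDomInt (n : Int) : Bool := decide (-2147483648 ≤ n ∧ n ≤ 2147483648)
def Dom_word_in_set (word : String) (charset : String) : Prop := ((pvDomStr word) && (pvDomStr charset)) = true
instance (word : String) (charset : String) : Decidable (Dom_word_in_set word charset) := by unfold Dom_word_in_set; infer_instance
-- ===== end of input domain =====

-- B replaces A's quadratic greedy find-and-delete loop by counting: build letter counters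
-- for word and charset, cover each letter deficit with a '.' wildcard, check dots suffice.

-- ===== PORT A =====
-- the 'for letter in word' loop over the shrinking remaining_set
def wisLoop : List Char → List Char → Bool
  | [], _remaining => true
  | letter :: rest, remaining =>
    let pos := PySem.Chars.find remaining [letter]
    if pos = -1 then
      let pos2 := PySem.Chars.find remaining ['.']
      if pos2 = -1 then false
      else
        wisLoop rest (PySem.Chars.slice remaining none (some pos2) ++
                      PySem.Chars.slice remaining (some (pos2 + 1)) none)
    else
      wisLoop rest (PySem.Chars.slice remaining none (some pos) ++
                    PySem.Chars.slice remaining (some (pos + 1)) none)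

def word_in_set (word : String) (charset : String) : Bool :=
  wisLoop word.toList charset.toList

-- ===== PORT B =====
def word_in_set_alt (word : String) (charset : String) : Bool :=
  let need := word.toList.foldl
    (fun d ch => d.insert ch (d.getD ch 0 + 1)) (PySem.Dict.empty : PySem.Dict Char Int)
  let haveC := charset.toList.foldl
    (fun d ch => d.insert ch (d.getD ch 0 + 1)) (PySem.Dict.empty : PySem.Dict Char Int)
  let dots0 : Int := haveC.getD '.' 0 - need.getD '.' 0
  let dots : Int := need.items.foldl
    (fun acc p => if p.1 ≠ '.' then acc - max 0 (p.2 - haveC.getD p.1 0) else acc) dots0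
  decide (dots ≥ 0)

-- ===== PRECONDITION & SPEC =====
def Spec_word_in_set (word : String) (charset : String) (out : Bool) : Prop := out = word_in_set_alt word charset
instance (word : String) (charset : String) (out : Bool) : Decidable (Spec_word_in_set word charset out) := by unfold Spec_word_in_set; infer_instance

-- ===== CLAIM (what is proved, stated in full; the proofs are below) =====
def Claim_equal_word_in_set : Prop := ∀ (word : String) (charset : String), Dom_word_in_set word charset → Spec_word_in_set word charset (word_in_set word charset)

-- ===== LEMMAS AND PROOFS =====

-- the letter deficit: dots needed to cover letters of w missing from s (dots counted apart)
def pvDef (w s : List Char) : Int :=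
  ∑ c ∈ w.toFinset.filter (fun c => c ≠ '.'), max 0 ((w.count c : Int) - (s.count c : Int))

-- the common characterisation both ports compute
def pvB (w s : List Char) : Bool :=
  decide ((w.count '.' : Int) + pvDef w s ≤ (s.count '.' : Int))

lemma pvDef_nonneg (w s : List Char) : 0 ≤ pvDef w s := by
  apply Finset.sum_nonneg; intro c _; omega

lemma find_single (s : List Char) (c : Char) (h : PySem.Chars.find s [c] ≠ -1) :
    ∃ n : Nat, PySem.Chars.find s [c] = (n : Int) ∧ s.drop n = c :: s.drop (n + 1) := by
  have h0 : 0 ≤ PySem.Chars.find s [c] := by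
    have := PySem.Chars.neg_one_le_find s [c]; omega
  obtain ⟨t, ht⟩ := (PySem.Chars.find_spec (s := s) (sub := [c]) h0).1
  refine ⟨(PySem.Chars.find s [c]).toNat, (Int.toNat_of_nonneg h0).symm, ?_⟩
  have hd : s.drop (PySem.Chars.find s [c]).toNat = c :: t := by rw [← ht]; rfl
  have ht' : s.drop ((PySem.Chars.find s [c]).toNat + 1) = t := by
    rw [← List.tail_drop, hd]; rfl
  rw [hd, ht']

lemma splice_count (s : List Char) (n : Nat) (l : Char)
    (h : s.drop n = l :: s.drop (n + 1)) (c : Char) :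
    ((s.take n ++ s.drop (n + 1)).count c : Int)
      = (s.count c : Int) - (if c = l then 1 else 0) := by
  have hs : s = s.take n ++ s.drop n := (List.take_append_drop n s).symm
  conv_rhs => rw [hs, h]
  simp only [List.count_append, List.count_cons]
  by_cases hc : c = l
  · simp [hc]; omega
  · simp [hc, Ne.symm hc]

lemma splice_eq (s : List Char) (n : Nat) :
    PySem.Chars.slice s none (some ((n : Int))) ++ PySem.Chars.slice s (some ((n : Int) + 1)) none
      = s.take n ++ s.drop (n + 1) := by
  simp only [PySem.Chars.slice_eq_listSlice]
  rw [PySem.List.slice_to (xs := s) (b := (n:Int)) (by positivity),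
      PySem.List.slice_from (xs := s) (a := (n:Int) + 1) (by positivity)]
  have h1 : ((n : Int) + 1).toNat = n + 1 := by omega
  have h2 : ((n : Int)).toNat = n := by omega
  rw [h1, h2]

lemma mem_iff_find_ne (s : List Char) (c : Char) :
    PySem.Chars.find s [c] ≠ -1 ↔ c ∈ s := by
  rw [PySem.Chars.find_ne_neg_one_iff]
  constructor
  · intro h; exact h.mem (by simp)
  · intro h
    obtain ⟨t1, t2, ht⟩ := List.append_of_mem h
    exact ⟨t1, t2, by simp [ht]⟩

-- extend the deficit sum for r over the (possibly larger) character set of l :: r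
lemma pvDef_extend (l : Char) (r s' : List Char) :
    pvDef r s' = ∑ c ∈ (l :: r).toFinset.filter (fun c => c ≠ '.'),
      max 0 ((r.count c : Int) - (s'.count c : Int)) := by
  unfold pvDef
  apply Finset.sum_subset
  · apply Finset.filter_subset_filter
    intro c hc; simp at hc ⊢; exact Or.inr hc
  · intro c hc hc2
    have hcd : c ≠ '.' := (Finset.mem_filter.1 hc).2
    have hcr : c ∉ r := by
      intro hmem; exact hc2 (Finset.mem_filter.2 ⟨List.mem_toFinset.2 hmem, hcd⟩)
    rw [List.count_eq_zero_of_not_mem hcr]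
    have := Int.natCast_nonneg (s'.count c)
    omega

lemma wisLoop_eq (w : List Char) : ∀ s : List Char, wisLoop w s = pvB w s := by
  induction w with
  | nil =>
    intro s
    rw [wisLoop]
    unfold pvB pvDef
    symm
    simp only [decide_eq_true_eq, List.count_nil, List.toFinset_nil, Finset.filter_empty,
      Finset.sum_empty, Nat.cast_zero, add_zero]
    positivity
  | cons l r ih =>
    intro s
    rw [wisLoop]
    by_cases h1 : PySem.Chars.find s [l] = -1
    · by_cases h2 : PySem.Chars.find s ['.'] = -1
      · -- neither the letter nor a dot remains: A returns False, pvB must be false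
        simp only [h1, h2, if_true]
        have hls : l ∉ s := fun hm => ((mem_iff_find_ne s l).2 hm) h1
        have hds : ('.' : Char) ∉ s := fun hm => ((mem_iff_find_ne s '.').2 hm) h2
        have hsd : s.count '.' = 0 := List.count_eq_zero_of_not_mem hds
        symm
        unfold pvB
        simp only [decide_eq_false_iff_not]
        intro hp
        rw [hsd] at hp
        by_cases hl : l = '.'
        · have h3 : (l :: r).count '.' ≥ 1 := by
            rw [hl, List.count_cons_self]; omega
          have := pvDef_nonneg (l :: r) s
          omega
        · have hmem : l ∈ (l :: r).toFinset.filter (fun c => c ≠ '.') := by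
            simp [hl]
          have hterm : (1 : Int) ≤ max 0 (((l :: r).count l : Int) - (s.count l : Int)) := by
            rw [List.count_eq_zero_of_not_mem hls, List.count_cons_self]
            push_cast
            omega
          have hsum : (1 : Int) ≤ pvDef (l :: r) s := by
            refine le_trans hterm ?_
            exact Finset.single_le_sum
              (f := fun c => max 0 (((l :: r).count c : Int) - (s.count c : Int)))
              (fun c _ => le_max_left 0 _) hmem
          have h4 := Int.natCast_nonneg ((l :: r).count '.')
          omega
      · -- no letter l, but a dot remains: consume a dot
        simp only [h1, h2, if_true, if_false]
        obtain ⟨n, hn, hdrop⟩ := find_single s '.' h2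
        rw [hn, splice_eq s n, ih]
        have hls : l ∉ s := fun hm => ((mem_iff_find_ne s l).2 hm) h1
        have hl : l ≠ '.' := by
          intro he; subst he
          refine hls ?_
          have hsub : s.drop n ⊆ s := List.drop_subset n s
          exact hsub (by rw [hdrop]; exact List.mem_cons_self ..)
        set s' := s.take n ++ s.drop (n + 1) with hs'
        have hcount := splice_count s n '.' hdrop
        unfold pvB
        rw [decide_eq_decide]
        rw [pvDef_extend l r s']
        unfold pvDef
        have hlmem : l ∈ (l :: r).toFinset.filter (fun c => c ≠ '.') := by simp [hl]
        rw [← Finset.sum_erase_add _ _ hlmem, ← Finset.sum_erase_add _ _ hlmem]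
        have hsame : ∀ c ∈ ((l :: r).toFinset.filter (fun c => c ≠ '.')).erase l,
            max 0 (((l :: r).count c : Int) - (s.count c : Int))
              = max 0 ((r.count c : Int) - (s'.count c : Int)) := by
          intro c hc
          obtain ⟨hcl, hcf⟩ := Finset.mem_erase.1 hc
          have hcd : c ≠ '.' := (Finset.mem_filter.1 hcf).2
          rw [hcount c, if_neg hcd, List.count_cons_of_ne (Ne.symm hcl)]
          simp
        rw [Finset.sum_congr rfl hsame]
        have hterm_l : max 0 (((l :: r).count l : Int) - (s.count l : Int))
            = max 0 ((r.count l : Int) - (s'.count l : Int)) + 1 := by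
          rw [hcount l, if_neg hl, List.count_eq_zero_of_not_mem hls, List.count_cons_self]
          push_cast
          omega
        have hdotw : (l :: r).count '.' = r.count '.' := List.count_cons_of_ne hl
        have hdots : (s'.count '.' : Int) = (s.count '.' : Int) - 1 := by
          rw [hcount '.', if_pos rfl]
        rw [hterm_l, hdotw]
        omega
    · -- the letter itself remains: consume it
      simp only [if_neg h1]
      obtain ⟨n, hn, hdrop⟩ := find_single s l h1
      rw [hn, splice_eq s n, ih]
      set s' := s.take n ++ s.drop (n + 1) with hs'
      have hcount := splice_count s n l hdrop
      have hls : l ∈ s := (mem_iff_find_ne s l).1 h1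
      unfold pvB
      rw [decide_eq_decide]
      rw [pvDef_extend l r s']
      unfold pvDef
      have hsame : ∀ c ∈ (l :: r).toFinset.filter (fun c => c ≠ '.'),
          max 0 (((l :: r).count c : Int) - (s.count c : Int))
            = max 0 ((r.count c : Int) - (s'.count c : Int)) := by
        intro c hc
        rw [hcount c]
        by_cases hcl : c = l
        · subst hcl
          rw [if_pos rfl, List.count_cons_self]
          push_cast
          congr 1
          ring
        · rw [if_neg hcl, List.count_cons_of_ne (Ne.symm hcl)]
          simp
      rw [Finset.sum_congr rfl hsame]
      have hsl1 : 1 ≤ s.count l := List.count_pos_iff.2 hls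
      by_cases hl : l = '.'
      · subst hl
        have hdotw : (('.' : Char) :: r).count '.' = r.count '.' + 1 := List.count_cons_self
        have hdots : (s'.count '.' : Int) = (s.count '.' : Int) - 1 := by
          rw [hcount '.', if_pos rfl]
        rw [hdotw]
        push_cast
        omega
      · have hdotw : (l :: r).count '.' = r.count '.' := List.count_cons_of_ne hl
        have hdots : (s'.count '.' : Int) = (s.count '.' : Int) := by
          rw [hcount '.', if_neg (Ne.symm hl)]; ring
        rw [hdotw]
        omega

lemma foldl_sub_sum (L : List (Char × Int)) (g : Char × Int → Int) (init : Int) :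
    L.foldl (fun acc p => acc - g p) init = init - (L.map g).sum := by
  induction L generalizing init with
  | nil => simp
  | cons p t iht => simp [List.foldl_cons, iht]; ring

lemma sum_ofList_filter (w : List Char) (F : Char → Int) :
    (((PySem.Set.ofList w).filter (fun c => decide (c ≠ '.'))).map F).sum
      = ∑ c ∈ w.toFinset.filter (fun c => c ≠ '.'), F c := by
  have hnd : ((PySem.Set.ofList w).filter (fun c => decide (c ≠ '.'))).Nodup :=
    (PySem.Set.nodup_ofList w).filter _
  rw [← List.sum_toFinset F hnd]
  congr 1
  ext c
  simp [PySem.Set.mem_ofList]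

lemma alt_eq (word charset : String) :
    word_in_set_alt word charset = pvB word.toList charset.toList := by
  unfold word_in_set_alt
  rw [PySem.Dict.foldl_insert_getD_add_one_eq_counter,
      PySem.Dict.foldl_insert_getD_add_one_eq_counter]
  simp only [PySem.Dict.getD_counter, PySem.Dict.items_counter]
  rw [PySem.List.foldl_ite_eq_foldl_filter
        (p := fun p : Char × Int => p.1 ≠ '.')
        (f := fun acc p => acc - max 0 (p.2 - (charset.toList.count p.1 : Int))),
      foldl_sub_sum]
  rw [List.filter_map, List.map_map]
  have hfun : ((fun p : Char × Int =>
        max 0 (p.2 - (charset.toList.count p.1 : Int))) ∘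
      fun k => (k, (word.toList.count k : Int)))
      = fun c => max 0 ((word.toList.count c : Int) - (charset.toList.count c : Int)) := by
    funext c; simp
  rw [show (Function.comp (fun p : Char × Int => decide (p.1 ≠ '.'))
        (fun k => (k, (word.toList.count k : Int)))) = (fun c : Char => decide (c ≠ '.')) from rfl,
      hfun, sum_ofList_filter]
  unfold pvB pvDef
  simp only [ge_iff_le, decide_eq_decide]
  generalize (∑ c ∈ word.toList.toFinset.filter (fun c => c ≠ '.'),
    max 0 ((word.toList.count c : Int) - (charset.toList.count c : Int))) = D
  omega

-- ===== VERDICT (by name: the statement is the Claim_ definition above) =====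
theorem word_in_set_spec : Claim_equal_word_in_set := by
  intro word charset _
  unfold Spec_word_in_set
  rw [alt_eq]
  unfold word_in_set
  rw [wisLoop_eq]
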